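-- pv_equiv track=rewrite | github.com/ebagos/python | rled/rled.py | brle
-- ===== SOURCE A (Python) =====
-- from itertools import groupby
--
-- def crle(dat):
--     rc = []
--     for k, g in groupby(dat):
--         rc.append((k, len(list(g))))
--     return rc
--
-- def brle(dat):
--     if type(dat) == str or type(dat[0]) == str:
--         dat = list(map(int, map(ord, dat)))
--     tmp = []
--     for c in dat:
--         for b in reversed(range(8)):
--             tmp.append((c & (1<<b))>>b)
--     return crle(tmp)
-- ===== SOURCE B (Python) =====
-- def brle(dat):
--     if type(dat) == str or (dat and type(dat[0]) == str):
--         dat = [ord(ch) for ch in dat]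
--     out = []
--     cur = None
--     cnt = 0
--     for c in dat:
--         for b in range(7, -1, -1):
--             bit = (c >> b) & 1
--             if cur is None:
--                 cur, cnt = bit, 1
--             elif bit == cur:
--                 cnt += 1
--             else:
--                 out.append((cur, cnt))
--                 cur, cnt = bit, 1
--     if cur is not None:
--         out.append((cur, cnt))
--     return out
-- ===== Notes on version B (the rewrite author's own statement) =====
-- stated objective: alternative
-- what changed: B fuses bit-expansion and run-length encoding into one streaming pass that keeps only the current run (value, count), instead of A's materialising the full 8*n bit list and then grouping it with groupby.
import Mathlib
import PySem

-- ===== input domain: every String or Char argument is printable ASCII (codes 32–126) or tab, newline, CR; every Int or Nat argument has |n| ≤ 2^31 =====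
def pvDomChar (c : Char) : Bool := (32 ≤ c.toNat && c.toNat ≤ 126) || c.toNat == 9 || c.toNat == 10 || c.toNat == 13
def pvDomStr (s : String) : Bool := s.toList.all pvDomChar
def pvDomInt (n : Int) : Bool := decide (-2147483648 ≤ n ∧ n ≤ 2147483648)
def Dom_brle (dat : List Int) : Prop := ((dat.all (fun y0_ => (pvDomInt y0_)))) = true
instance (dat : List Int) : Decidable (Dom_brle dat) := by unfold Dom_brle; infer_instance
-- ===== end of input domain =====

-- B fuses bit-expansion and run-length encoding into one streaming pass keeping only the
-- current run, instead of A's full intermediate bit list followed by groupby.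

-- ===== PORT A =====
-- A's bit expression (c & (1<<b)) >> b; b from reversed(range(8)) is 0..7, so b.toNat is exact
def bitA (c b : Int) : Int := (PySem.Int.band c (1 <<< b.toNat)) >>> b.toNat

-- port of crle's groupby loop: consume a run of k's (current count n), emit (k, n) at each change
def crleGroup (k : Int) (n : Int) : List Int → List (Int × Int)
  | [] => [(k, n)]
  | x :: xs => if x = k then crleGroup k (n + 1) xs else (k, n) :: crleGroup x 1 xs

def crlePort : List Int → List (Int × Int)
  | [] => []
  | x :: xs => crleGroup x 1 xs

-- dat : List Int, so A's `type(dat) == str or type(dat[0]) == str` guard is always False;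
-- evaluating dat[0] still raises IndexError on [], which Pre_brle excludes (the [] branch
-- here is unreachable under Pre_brle).
def brle (dat : List Int) : List (Int × Int) :=
  match dat with
  | [] => []
  | _ :: _ =>
    let tmp := dat.foldl (fun tmp c =>
      ((PySem.List.pyRange 0 8 1).reverse).foldl
        (fun tmp b => tmp ++ [bitA c b]) tmp) ([] : List Int)
    crlePort tmp

-- ===== PORT B =====
-- B's bit expression (c >> b) & 1; b from range(7,-1,-1) is 7..0, so b.toNat is exact
def bitB (c b : Int) : Int := PySem.Int.band (c >>> b.toNat) 1

-- one RLE step of Source B's loop body: state = (emitted runs, current run if any)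
def altStep (st : List (Int × Int) × Option (Int × Int)) (bit : Int) :
    List (Int × Int) × Option (Int × Int) :=
  match st with
  | (out, none) => (out, some (bit, 1))
  | (out, some (v, n)) =>
      if bit = v then (out, some (v, n + 1)) else (out ++ [(v, n)], some (bit, 1))

-- the str guard is dead code for List Int (and B's guard is False for []).
def brle_alt (dat : List Int) : List (Int × Int) :=
  let st := dat.foldl (fun st c =>
    (PySem.List.pyRange 7 (-1) (-1)).foldl
      (fun st b => altStep st (bitB c b)) st)
    (([], none) : List (Int × Int) × Option (Int × Int))
  match st with
  | (out, none) => out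
  | (out, some p) => out ++ [p]

-- ===== PRECONDITION & SPEC =====
-- Pre_ excludes only the empty list, on which Python A raises IndexError (dat[0]).
def Pre_brle (dat : List Int) : Prop := dat ≠ []
instance (dat : List Int) : Decidable (Pre_brle dat) := by unfold Pre_brle; infer_instance
def pvWitness_brle : List Int := [5]

def Spec_brle (dat : List Int) (out : List (Int × Int)) : Prop := out = brle_alt dat
instance (dat : List Int) (out : List (Int × Int)) : Decidable (Spec_brle dat out) := by unfold Spec_brle; infer_instance

-- ===== CLAIM (what is proved, stated in full; the proofs are below) =====
def Claim_equal_brle : Prop := ∀ (dat : List Int), Dom_brle dat → Pre_brle dat → Spec_brle dat (brle dat)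

-- ===== LEMMAS AND PROOFS =====

-- the 8 bits of c, most significant first (shared normal form of both inner loops)
def bitsOf (c : Int) : List Int :=
  [7, 6, 5, 4, 3, 2, 1, 0].map (fun b : Int => bitB c b)

theorem testBit_toNat (m b : ℕ) : (m.testBit b).toNat = m / 2 ^ b % 2 := by
  rw [Nat.testBit_eq_decide_div_mod_eq]
  rcases Nat.mod_two_eq_zero_or_one (m / 2 ^ b) with h | h <;> simp [h]

theorem mod_two_emod (a : ℤ) : PySem.Int.mod a 2 = a % 2 := by
  unfold PySem.Int.mod
  rw [Int.fmod_eq_emod, if_pos (Or.inl (by norm_num)), add_zero]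

-- A's bit expression equals B's bit expression
theorem bitEq (c : Int) (b : Nat) :
    (PySem.Int.band c (1 <<< b)) >>> b = PySem.Int.band (c >>> b) 1 := by
  rw [PySem.Int.band_one, Int.shiftRight_eq_div_pow, Int.shiftRight_eq_div_pow, mod_two_emod]
  simp only [Nat.one_shiftLeft]
  have h2 : (0 : ℕ) < 2 ^ b := Nat.two_pow_pos b
  cases c with
  | ofNat m =>
    rw [show ((Int.ofNat m) = ((m : ℕ) : Int)) from rfl]
    rw [PySem.Int.band_natCast, Nat.and_two_pow, testBit_toNat, ← Int.natCast_ediv,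
      ← Int.natCast_ediv, Nat.mul_div_cancel _ h2]
    omega
  | negSucc m =>
    have hb : PySem.Int.band (Int.negSucc m) ((2 ^ b : ℕ) : ℤ)
        = ((2 ^ b - (m.testBit b).toNat * 2 ^ b : ℕ) : ℤ) := by
      unfold PySem.Int.band
      have h1 : ¬ (0 ≤ Int.negSucc m) := by omega
      have h3 : (0 : ℤ) ≤ ((2 ^ b : ℕ) : ℤ) := by positivity
      simp only [h1, h3, if_true, if_false]
      have e2 : (-(Int.negSucc m) - 1).toNat = m := by simp [Int.negSucc_eq]
      rw [Int.toNat_natCast, e2, Nat.and_comm, Nat.and_two_pow]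
    rw [hb, testBit_toNat]
    have hneg : (Int.negSucc m) / ((2 ^ b : ℕ) : ℤ) = -(((m : ℤ) / ((2 ^ b : ℕ) : ℤ)) + 1) :=
      Int.negSucc_ediv m (by exact_mod_cast h2)
    rw [hneg, ← Int.natCast_ediv, ← Int.natCast_ediv]
    rcases Nat.mod_two_eq_zero_or_one (m / 2 ^ b) with h | h <;> rw [h]
    · rw [Nat.zero_mul, Nat.sub_zero, Nat.div_self h2]; omega
    · rw [Nat.one_mul, Nat.sub_self, Nat.zero_div]; omega

-- hence A's and B's bit expressions agree
theorem bitAB (c b : Int) : bitA c b = bitB c b := bitEq c b.toNat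

-- A's inner loop appends exactly bitsOf c
theorem innerA (c : Int) (tmp : List Int) :
    ((PySem.List.pyRange 0 8 1).reverse).foldl
      (fun tmp b => tmp ++ [bitA c b]) tmp
      = tmp ++ bitsOf c := by
  have h : (PySem.List.pyRange 0 8 1).reverse = [7, 6, 5, 4, 3, 2, 1, 0] := by decide
  rw [h]
  simp [List.foldl, bitsOf, bitAB]

-- B's inner loop is a fold of altStep over bitsOf c
theorem innerB (c : Int) (st : List (Int × Int) × Option (Int × Int)) :
    (PySem.List.pyRange 7 (-1) (-1)).foldl
      (fun st b => altStep st (bitB c b)) st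
      = (bitsOf c).foldl altStep st := by
  have h : PySem.List.pyRange 7 (-1) (-1) = [7, 6, 5, 4, 3, 2, 1, 0] := by decide
  rw [h]
  rfl

-- folding element-wise over dat equals folding over the flattened bit list
theorem outerB (dat : List Int) (init : List (Int × Int) × Option (Int × Int)) :
    dat.foldl (fun st c => (bitsOf c).foldl altStep st) init
      = (dat.flatMap bitsOf).foldl altStep init := by
  induction dat generalizing init with
  | nil => rfl
  | cons x xs ih => simp [List.flatMap_cons, List.foldl_append, ih]

-- invariant of the streaming RLE: flushing after folding from an open run (v, n)
theorem rleInv (xs : List Int) (out : List (Int × Int)) (v n : Int) :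
    (match xs.foldl altStep (out, some (v, n)) with
     | (o, none) => o
     | (o, some p) => o ++ [p]) = out ++ crleGroup v n xs := by
  induction xs generalizing out v n with
  | nil => rfl
  | cons x xs ih =>
    simp only [List.foldl_cons, altStep, crleGroup]
    by_cases h : x = v
    · simp [h, ih]
    · simp [h, ih, List.append_assoc]

-- the streaming RLE equals the groupby RLE
theorem rleEq (L : List Int) :
    (match L.foldl altStep (([], none) : List (Int × Int) × Option (Int × Int)) with
     | (o, none) => o
     | (o, some p) => o ++ [p]) = crlePort L := by
  cases L with
  | nil => rfl
  | cons x xs =>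
    simp only [List.foldl_cons, altStep, crlePort]
    exact rleInv xs [] x 1

-- ===== VERDICT (by name: the statement is the Claim_ definition above) =====
theorem brle_spec : Claim_equal_brle := by
  intro dat _ hpre
  unfold Spec_brle brle brle_alt
  match dat with
  | [] => exact absurd rfl hpre
  | x :: xs =>
    simp only [innerA, innerB]
    simp only [PySem.List.foldl_append_eq_flatMap, List.nil_append, outerB]
    exact (rleEq _).symm
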